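-- pv_equiv track=rewrite | github.com/pablobg01/TFG-Deteccion-Eventos-Transitorios | entrenamiento_random_forest.py | map_class_robusta
-- ===== SOURCE A (Python) =====
-- def map_class_robusta(label):
--     label = str(label).lower().replace('?', '').strip()
--     if "sn" in label: return "SN"
--     if "cv" in label or "nova" in label: return "CV"
--     if "agn" in label: return "AGN"
--     if "blazar" in label: return "Blazar"
--     if "flare" in label: return "Flare"
--     if "hpm" in label: return "HPM"
--     if any(x in label for x in ["lpv", "yso", "agb", "variable", "var", "mira", "rrl", "rcorb", "rrlyrae", "amcvn", "carbon"]):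
--         return "StellarVar"
--     if "ast" in label or "comet" in label: return "Asteroid"
--     return None
-- ===== SOURCE B (Python) =====
-- def map_class_robusta(label):
--     label = str(label).lower().replace('?', '').strip()
--     kw = {"sn": 0, "cv": 1, "nova": 1, "agn": 2, "blazar": 3, "flare": 4,
--           "hpm": 5, "lpv": 6, "yso": 6, "agb": 6, "variable": 6, "var": 6,
--           "mira": 6, "rrl": 6, "rcorb": 6, "rrlyrae": 6, "amcvn": 6,
--           "carbon": 6, "ast": 7, "comet": 7}
--     cats = ["SN", "CV", "AGN", "Blazar", "Flare", "HPM", "StellarVar", "Asteroid"]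
--     best = 8
--     for i in range(len(label)):
--         for k, p in kw.items():
--             if p < best and label.startswith(k, i):
--                 best = p
--     return cats[best] if best < 8 else None
-- ===== Notes on version B (the rewrite author's own statement) =====
-- stated objective: alternative
-- what changed: Instead of A's ordered chain of per-keyword containment scans, B makes one sweep over the label's positions, testing keywords from a priority dictionary as prefixes at each position and keeping the minimum priority, then maps that minimum to its category table entry.
import Mathlib
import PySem

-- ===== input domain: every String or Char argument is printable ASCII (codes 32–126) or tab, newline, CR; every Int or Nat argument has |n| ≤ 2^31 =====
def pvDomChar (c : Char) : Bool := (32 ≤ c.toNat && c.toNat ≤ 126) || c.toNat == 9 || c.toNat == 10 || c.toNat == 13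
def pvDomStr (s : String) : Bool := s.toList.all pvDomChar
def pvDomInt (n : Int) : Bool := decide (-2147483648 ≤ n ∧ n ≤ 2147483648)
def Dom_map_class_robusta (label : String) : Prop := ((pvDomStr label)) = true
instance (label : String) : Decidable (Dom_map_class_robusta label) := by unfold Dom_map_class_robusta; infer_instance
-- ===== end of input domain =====

-- B replaces A's ordered chain of per-keyword containment tests by one sweep over the
-- label's suffixes that keeps the minimum priority of any keyword found as a prefix
-- (objective: alternative).

-- shared by both ports: the normalization line `str(label).lower().replace('?','').strip()`
def pvNorm (label : String) : String :=
  PySem.Str.strip (PySem.Str.replace (PySem.Str.lower label) "?" "")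

-- ===== PORT A =====
def map_class_robusta (label : String) : Option String :=
  let label := pvNorm label
  if PySem.Str.isIn "sn" label then some "SN"
  else if PySem.Str.isIn "cv" label || PySem.Str.isIn "nova" label then some "CV"
  else if PySem.Str.isIn "agn" label then some "AGN"
  else if PySem.Str.isIn "blazar" label then some "Blazar"
  else if PySem.Str.isIn "flare" label then some "Flare"
  else if PySem.Str.isIn "hpm" label then some "HPM"
  else if (["lpv", "yso", "agb", "variable", "var", "mira", "rrl", "rcorb", "rrlyrae", "amcvn", "carbon"]).any (fun x => PySem.Str.isIn x label) then some "StellarVar"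
  else if PySem.Str.isIn "ast" label || PySem.Str.isIn "comet" label then some "Asteroid"
  else none

-- ===== PORT B =====
-- the priority dictionary kw (insertion order) and the category table cats of Source B
def pvKw : List (List Char × Nat) :=
  [("sn".toList, 0), ("cv".toList, 1), ("nova".toList, 1), ("agn".toList, 2),
   ("blazar".toList, 3), ("flare".toList, 4), ("hpm".toList, 5),
   ("lpv".toList, 6), ("yso".toList, 6), ("agb".toList, 6), ("variable".toList, 6),
   ("var".toList, 6), ("mira".toList, 6), ("rrl".toList, 6), ("rcorb".toList, 6),
   ("rrlyrae".toList, 6), ("amcvn".toList, 6), ("carbon".toList, 6),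
   ("ast".toList, 7), ("comet".toList, 7)]

def pvCats : List String :=
  ["SN", "CV", "AGN", "Blazar", "Flare", "HPM", "StellarVar", "Asteroid"]

-- the inner `for k, p in kw.items(): if p < best and label.startswith(k, i): best = p`;
-- `label.startswith(k, i)` is exactly: k is a prefix of the current suffix `rest = label[i:]`
def pvStep (best : Nat) (rest : List Char) : Nat :=
  pvKw.foldl (fun b kp => if kp.2 < b && PySem.Chars.startswith rest kp.1 then kp.2 else b) best

-- the outer `for i in range(len(label))`: ported as structural recursion on the loop's
-- state, the current suffix label[i:] (successive tails of the label)
def pvScan : List Char → Nat → Nat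
  | [], best => best
  | c :: rest, best => pvScan rest (pvStep best (c :: rest))

def map_class_robusta_alt (label : String) : Option String :=
  let label := pvNorm label
  let best := pvScan label.toList 8
  if best < 8 then some (pvCats.getD best "") else none

-- ===== PRECONDITION & SPEC =====
def Spec_map_class_robusta (label : String) (out : Option String) : Prop := out = map_class_robusta_alt label
instance (label : String) (out : Option String) : Decidable (Spec_map_class_robusta label out) := by unfold Spec_map_class_robusta; infer_instance

-- ===== CLAIM (what is proved, stated in full; the proofs are below) =====
def Claim_equal_map_class_robusta : Prop := ∀ (label : String), Dom_map_class_robusta label → Spec_map_class_robusta label (map_class_robusta label)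

-- ===== LEMMAS AND PROOFS =====

lemma pv_step_aux_le (L : List (List Char × Nat)) (rest : List Char) :
    ∀ b, L.foldl (fun b kp => if kp.2 < b && PySem.Chars.startswith rest kp.1 then kp.2 else b) b ≤ b := by
  induction L with
  | nil => intro b; simp
  | cons kp L ih =>
      intro b
      simp only [List.foldl_cons]
      refine le_trans (ih _) ?_
      split_ifs with h
      · simp only [Bool.and_eq_true, decide_eq_true_eq] at h; omega
      · exact le_refl b

lemma pv_step_aux_mem (L : List (List Char × Nat)) (rest : List Char) :
    ∀ b, L.foldl (fun b kp => if kp.2 < b && PySem.Chars.startswith rest kp.1 then kp.2 else b) b = b ∨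
      ∃ kp ∈ L, kp.2 = L.foldl (fun b kp => if kp.2 < b && PySem.Chars.startswith rest kp.1 then kp.2 else b) b ∧
        PySem.Chars.startswith rest kp.1 = true := by
  induction L with
  | nil => intro b; left; rfl
  | cons kp L ih =>
      intro b
      simp only [List.foldl_cons]
      rcases ih (if kp.2 < b && PySem.Chars.startswith rest kp.1 then kp.2 else b) with h | ⟨kq, hm, he, hs⟩
      · rw [h]
        split_ifs with hc
        · simp only [Bool.and_eq_true, decide_eq_true_eq] at hc
          exact Or.inr ⟨kp, List.mem_cons_self .., rfl, hc.2⟩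
        · exact Or.inl rfl
      · exact Or.inr ⟨kq, List.mem_cons_of_mem _ hm, he, hs⟩

lemma pv_step_aux_lb (L : List (List Char × Nat)) (rest : List Char) (kp : List Char × Nat)
    (hm : kp ∈ L) (hp : PySem.Chars.startswith rest kp.1 = true) :
    ∀ b, L.foldl (fun b kp => if kp.2 < b && PySem.Chars.startswith rest kp.1 then kp.2 else b) b ≤ kp.2 := by
  induction L with
  | nil => cases hm
  | cons kq L ih =>
      intro b
      simp only [List.foldl_cons]
      rcases List.mem_cons.mp hm with rfl | hm'
      · refine le_trans (pv_step_aux_le L rest _) ?_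
        rw [hp]
        simp only [Bool.and_true]
        split_ifs with h
        · exact le_refl _
        · simp only [decide_eq_true_eq] at h; omega
      · exact ih hm' _

lemma pv_scan_le (l : List Char) : ∀ b, pvScan l b ≤ b := by
  induction l with
  | nil => intro b; simp [pvScan]
  | cons c rest ih =>
      intro b
      simp only [pvScan]
      exact le_trans (ih _) (pv_step_aux_le pvKw (c :: rest) b)

lemma pv_scan_mem (l : List Char) :
    ∀ b, pvScan l b = b ∨ ∃ kp ∈ pvKw, kp.2 = pvScan l b ∧ kp.1 <:+: l := by
  induction l with
  | nil => intro b; left; rfl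
  | cons c rest ih =>
      intro b
      simp only [pvScan]
      rcases ih (pvStep b (c :: rest)) with h | ⟨kp, hm, he, hi⟩
      · rw [h]
        rcases pv_step_aux_mem pvKw (c :: rest) b with h2 | ⟨kp, hm, he, hs⟩
        · exact Or.inl h2
        · exact Or.inr ⟨kp, hm, he, (List.infix_cons_iff).mpr
            (Or.inl ((PySem.Chars.startswith_iff _ _).mp hs))⟩
      · exact Or.inr ⟨kp, hm, he, (List.infix_cons_iff).mpr (Or.inr hi)⟩

lemma pv_kw_ne_nil : ∀ kp ∈ pvKw, kp.1 ≠ [] := by decide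

lemma pv_prio_le : ∀ kp ∈ pvKw, kp.2 ≤ 7 := by decide

lemma pv_mem_elim {kp : List Char × Nat} (hm : kp ∈ pvKw) :
    kp = ("sn".toList, 0) ∨
      kp = ("cv".toList, 1) ∨
      kp = ("nova".toList, 1) ∨
      kp = ("agn".toList, 2) ∨
      kp = ("blazar".toList, 3) ∨
      kp = ("flare".toList, 4) ∨
      kp = ("hpm".toList, 5) ∨
      kp = ("lpv".toList, 6) ∨
      kp = ("yso".toList, 6) ∨
      kp = ("agb".toList, 6) ∨
      kp = ("variable".toList, 6) ∨
      kp = ("var".toList, 6) ∨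
      kp = ("mira".toList, 6) ∨
      kp = ("rrl".toList, 6) ∨
      kp = ("rcorb".toList, 6) ∨
      kp = ("rrlyrae".toList, 6) ∨
      kp = ("amcvn".toList, 6) ∨
      kp = ("carbon".toList, 6) ∨
      kp = ("ast".toList, 7) ∨
      kp = ("comet".toList, 7) := by
  simpa only [pvKw, List.mem_cons, List.not_mem_nil, or_false] using hm

lemma pv_scan_lb (kp : List Char × Nat) (hm : kp ∈ pvKw) :
    ∀ l, kp.1 <:+: l → ∀ b, pvScan l b ≤ kp.2 := by
  intro l
  induction l with
  | nil =>
      intro hi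
      exact absurd (List.infix_nil.mp hi) (pv_kw_ne_nil kp hm)
  | cons c rest ih =>
      intro hi b
      simp only [pvScan]
      rcases List.infix_cons_iff.mp hi with hpre | hinf
      · refine le_trans (pv_scan_le rest _) ?_
        exact pv_step_aux_lb pvKw (c :: rest) kp hm ((PySem.Chars.startswith_iff _ _).mpr hpre) b
      · exact ih hinf _

-- the scan's result is p as soon as some keyword of priority p matches and no matching keyword has smaller priority
lemma pv_r_eq (s : List Char) (p : Nat)
    (hub : ∃ kp ∈ pvKw, kp.2 = p ∧ kp.1 <:+: s)
    (hlb : ∀ kp ∈ pvKw, kp.1 <:+: s → p ≤ kp.2) : pvScan s 8 = p := by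
  obtain ⟨kp, hm, hp, hi⟩ := hub
  have h1 : pvScan s 8 ≤ p := hp ▸ pv_scan_lb kp hm s hi 8
  rcases pv_scan_mem s 8 with h2 | ⟨kq, hqm, hqe, hqi⟩
  · have := pv_prio_le kp hm; omega
  · have := hlb kq hqm hqi; omega

lemma pv_r_eq_8 (s : List Char) (h : ∀ kp ∈ pvKw, ¬ kp.1 <:+: s) : pvScan s 8 = 8 := by
  rcases pv_scan_mem s 8 with h2 | ⟨kq, hqm, _, hqi⟩
  · exact h2
  · exact absurd hqi (h kq hqm)

lemma pv_isIn_true {sub s : String} (h : sub.toList <:+: s.toList) :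
    PySem.Str.isIn sub s = true := by
  simp only [PySem.Str.isIn]; exact (PySem.Chars.isIn_iff_infix _ _).mpr h

lemma pv_isIn_false {sub s : String} (h : ¬ sub.toList <:+: s.toList) :
    PySem.Str.isIn sub s = false := by
  rw [Bool.eq_false_iff]
  intro hc
  simp only [PySem.Str.isIn] at hc
  exact h ((PySem.Chars.isIn_iff_infix _ _).mp hc)

lemma pv_main (s : String) :
    (if PySem.Str.isIn "sn" s then some "SN"
     else if PySem.Str.isIn "cv" s || PySem.Str.isIn "nova" s then some "CV"
     else if PySem.Str.isIn "agn" s then some "AGN"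
     else if PySem.Str.isIn "blazar" s then some "Blazar"
     else if PySem.Str.isIn "flare" s then some "Flare"
     else if PySem.Str.isIn "hpm" s then some "HPM"
     else if (["lpv", "yso", "agb", "variable", "var", "mira", "rrl", "rcorb", "rrlyrae", "amcvn", "carbon"]).any (fun x => PySem.Str.isIn x s) then some "StellarVar"
     else if PySem.Str.isIn "ast" s || PySem.Str.isIn "comet" s then some "Asteroid"
     else (none : Option String)) =
    (if pvScan s.toList 8 < 8 then some (pvCats.getD (pvScan s.toList 8) "") else none) := by
  by_cases h0 : "sn".toList <:+: s.toList
  · rw [pv_r_eq s.toList 0 ⟨("sn".toList, 0), by decide, rfl, h0⟩ (fun _ _ _ => Nat.zero_le _)]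
    simp only [pv_isIn_true h0]
    simp [pvCats]
  by_cases h1 : "cv".toList <:+: s.toList ∨ "nova".toList <:+: s.toList
  · have hlb : ∀ kp ∈ pvKw, kp.1 <:+: s.toList → 1 ≤ kp.2 := by
      intro kp hm hi
      rcases pv_mem_elim hm with rfl|rfl|rfl|rfl|rfl|rfl|rfl|rfl|rfl|rfl|rfl|rfl|rfl|rfl|rfl|rfl|rfl|rfl|rfl|rfl <;>
        first | decide | exact absurd hi (by assumption)
    have hub : ∃ kp ∈ pvKw, kp.2 = 1 ∧ kp.1 <:+: s.toList := by
      rcases h1 with h | h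
      · exact ⟨("cv".toList, 1), by decide, rfl, h⟩
      · exact ⟨("nova".toList, 1), by decide, rfl, h⟩
    rw [pv_r_eq s.toList 1 hub hlb]
    rcases h1 with h | h <;>
    · simp only [pv_isIn_false h0, pv_isIn_true h]
      simp [pvCats]
  push Not at h1
  obtain ⟨n1a, n1b⟩ := h1
  by_cases h2 : "agn".toList <:+: s.toList
  · have hlb : ∀ kp ∈ pvKw, kp.1 <:+: s.toList → 2 ≤ kp.2 := by
      intro kp hm hi
      rcases pv_mem_elim hm with rfl|rfl|rfl|rfl|rfl|rfl|rfl|rfl|rfl|rfl|rfl|rfl|rfl|rfl|rfl|rfl|rfl|rfl|rfl|rfl <;>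
        first | decide | exact absurd hi (by assumption)
    rw [pv_r_eq s.toList 2 ⟨("agn".toList, 2), by decide, rfl, h2⟩ hlb]
    simp only [pv_isIn_false h0, pv_isIn_false n1a, pv_isIn_false n1b, pv_isIn_true h2]
    simp [pvCats]
  by_cases h3 : "blazar".toList <:+: s.toList
  · have hlb : ∀ kp ∈ pvKw, kp.1 <:+: s.toList → 3 ≤ kp.2 := by
      intro kp hm hi
      rcases pv_mem_elim hm with rfl|rfl|rfl|rfl|rfl|rfl|rfl|rfl|rfl|rfl|rfl|rfl|rfl|rfl|rfl|rfl|rfl|rfl|rfl|rfl <;>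
        first | decide | exact absurd hi (by assumption)
    rw [pv_r_eq s.toList 3 ⟨("blazar".toList, 3), by decide, rfl, h3⟩ hlb]
    simp only [pv_isIn_false h0, pv_isIn_false n1a, pv_isIn_false n1b, pv_isIn_false h2,
      pv_isIn_true h3]
    simp [pvCats]
  by_cases h4 : "flare".toList <:+: s.toList
  · have hlb : ∀ kp ∈ pvKw, kp.1 <:+: s.toList → 4 ≤ kp.2 := by
      intro kp hm hi
      rcases pv_mem_elim hm with rfl|rfl|rfl|rfl|rfl|rfl|rfl|rfl|rfl|rfl|rfl|rfl|rfl|rfl|rfl|rfl|rfl|rfl|rfl|rfl <;>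
        first | decide | exact absurd hi (by assumption)
    rw [pv_r_eq s.toList 4 ⟨("flare".toList, 4), by decide, rfl, h4⟩ hlb]
    simp only [pv_isIn_false h0, pv_isIn_false n1a, pv_isIn_false n1b, pv_isIn_false h2,
      pv_isIn_false h3, pv_isIn_true h4]
    simp [pvCats]
  by_cases h5 : "hpm".toList <:+: s.toList
  · have hlb : ∀ kp ∈ pvKw, kp.1 <:+: s.toList → 5 ≤ kp.2 := by
      intro kp hm hi
      rcases pv_mem_elim hm with rfl|rfl|rfl|rfl|rfl|rfl|rfl|rfl|rfl|rfl|rfl|rfl|rfl|rfl|rfl|rfl|rfl|rfl|rfl|rfl <;>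
        first | decide | exact absurd hi (by assumption)
    rw [pv_r_eq s.toList 5 ⟨("hpm".toList, 5), by decide, rfl, h5⟩ hlb]
    simp only [pv_isIn_false h0, pv_isIn_false n1a, pv_isIn_false n1b, pv_isIn_false h2,
      pv_isIn_false h3, pv_isIn_false h4, pv_isIn_true h5]
    simp [pvCats]
  by_cases h6 : "lpv".toList <:+: s.toList ∨ "yso".toList <:+: s.toList ∨
      "agb".toList <:+: s.toList ∨ "variable".toList <:+: s.toList ∨
      "var".toList <:+: s.toList ∨ "mira".toList <:+: s.toList ∨
      "rrl".toList <:+: s.toList ∨ "rcorb".toList <:+: s.toList ∨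
      "rrlyrae".toList <:+: s.toList ∨ "amcvn".toList <:+: s.toList ∨
      "carbon".toList <:+: s.toList
  · have hlb : ∀ kp ∈ pvKw, kp.1 <:+: s.toList → 6 ≤ kp.2 := by
      intro kp hm hi
      rcases pv_mem_elim hm with rfl|rfl|rfl|rfl|rfl|rfl|rfl|rfl|rfl|rfl|rfl|rfl|rfl|rfl|rfl|rfl|rfl|rfl|rfl|rfl <;>
        first | decide | exact absurd hi (by assumption)
    have hub : ∃ kp ∈ pvKw, kp.2 = 6 ∧ kp.1 <:+: s.toList := by
      rcases h6 with h|h|h|h|h|h|h|h|h|h|h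
      · exact ⟨("lpv".toList, 6), by decide, rfl, h⟩
      · exact ⟨("yso".toList, 6), by decide, rfl, h⟩
      · exact ⟨("agb".toList, 6), by decide, rfl, h⟩
      · exact ⟨("variable".toList, 6), by decide, rfl, h⟩
      · exact ⟨("var".toList, 6), by decide, rfl, h⟩
      · exact ⟨("mira".toList, 6), by decide, rfl, h⟩
      · exact ⟨("rrl".toList, 6), by decide, rfl, h⟩
      · exact ⟨("rcorb".toList, 6), by decide, rfl, h⟩
      · exact ⟨("rrlyrae".toList, 6), by decide, rfl, h⟩
      · exact ⟨("amcvn".toList, 6), by decide, rfl, h⟩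
      · exact ⟨("carbon".toList, 6), by decide, rfl, h⟩
    rw [pv_r_eq s.toList 6 hub hlb]
    rcases h6 with h|h|h|h|h|h|h|h|h|h|h <;>
    · simp only [pv_isIn_false h0, pv_isIn_false n1a, pv_isIn_false n1b, pv_isIn_false h2,
        pv_isIn_false h3, pv_isIn_false h4, pv_isIn_false h5, pv_isIn_true h,
        List.any_cons, List.any_nil]
      simp [pvCats]
  push Not at h6
  obtain ⟨n6a, n6b, n6c, n6d, n6e, n6f, n6g, n6h, n6i, n6j, n6k⟩ := h6
  by_cases h7 : "ast".toList <:+: s.toList ∨ "comet".toList <:+: s.toList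
  · have hlb : ∀ kp ∈ pvKw, kp.1 <:+: s.toList → 7 ≤ kp.2 := by
      intro kp hm hi
      rcases pv_mem_elim hm with rfl|rfl|rfl|rfl|rfl|rfl|rfl|rfl|rfl|rfl|rfl|rfl|rfl|rfl|rfl|rfl|rfl|rfl|rfl|rfl <;>
        first | decide | exact absurd hi (by assumption)
    have hub : ∃ kp ∈ pvKw, kp.2 = 7 ∧ kp.1 <:+: s.toList := by
      rcases h7 with h | h
      · exact ⟨("ast".toList, 7), by decide, rfl, h⟩
      · exact ⟨("comet".toList, 7), by decide, rfl, h⟩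
    rw [pv_r_eq s.toList 7 hub hlb]
    rcases h7 with h | h <;>
    · simp only [pv_isIn_false h0, pv_isIn_false n1a, pv_isIn_false n1b, pv_isIn_false h2,
        pv_isIn_false h3, pv_isIn_false h4, pv_isIn_false h5, pv_isIn_false n6a,
        pv_isIn_false n6b, pv_isIn_false n6c, pv_isIn_false n6d, pv_isIn_false n6e,
        pv_isIn_false n6f, pv_isIn_false n6g, pv_isIn_false n6h, pv_isIn_false n6i,
        pv_isIn_false n6j, pv_isIn_false n6k, pv_isIn_true h,
        List.any_cons, List.any_nil]
      simp [pvCats]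
  push Not at h7
  obtain ⟨n7a, n7b⟩ := h7
  have h8 : pvScan s.toList 8 = 8 := by
    refine pv_r_eq_8 s.toList ?_
    intro kp hm
    rcases pv_mem_elim hm with rfl|rfl|rfl|rfl|rfl|rfl|rfl|rfl|rfl|rfl|rfl|rfl|rfl|rfl|rfl|rfl|rfl|rfl|rfl|rfl <;>
      assumption
  rw [h8]
  simp only [pv_isIn_false h0, pv_isIn_false n1a, pv_isIn_false n1b, pv_isIn_false h2,
    pv_isIn_false h3, pv_isIn_false h4, pv_isIn_false h5, pv_isIn_false n6a,
    pv_isIn_false n6b, pv_isIn_false n6c, pv_isIn_false n6d, pv_isIn_false n6e,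
    pv_isIn_false n6f, pv_isIn_false n6g, pv_isIn_false n6h, pv_isIn_false n6i,
    pv_isIn_false n6j, pv_isIn_false n6k, pv_isIn_false n7a, pv_isIn_false n7b,
    List.any_cons, List.any_nil]
  simp

-- ===== VERDICT (by name: the statement is the Claim_ definition above) =====
theorem map_class_robusta_spec : Claim_equal_map_class_robusta := by
  intro label _
  unfold Spec_map_class_robusta
  exact pv_main (pvNorm label)
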